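-- pv_equiv track=rewrite | github.com/MaxGhi8/ProgettoOttimizzazione | ClusterILP.py | CalcolaCosto_minmax
-- ===== SOURCE A (Python) =====
-- def CalcolaCosto_minmax(dict_gironi, lista_coord):
--     """
--     Parameters
--     ----------
--     dict_gironi : dizionario
--         output della funzione ILP
--     lista_coord : lista
--         lista di tuple, con al posto i-esimo la tupla con le coordinate
--         associate alla squadra i-esima
--
--     Returns
--     -------
--     type = float
--       Calcola le massime distanze al quadrato tra le squadre all'interno dei
--     cluster e poi somma sui cluster (una sorta di costo del cluster)
--     """
--     costo_tot = 0
--     for girone in dict_gironi: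
--         squadre_girone = dict_gironi[girone]
--         costo_max_girone = 0
--         for squadra1 in squadre_girone:
--             for squadra2 in squadre_girone:
--                 distanza_al_quadrato = ((lista_coord[squadra1[1]-1][0] - lista_coord[squadra2[1]-1][0])**2 +
--                                         (lista_coord[squadra1[1]-1][1] - lista_coord[squadra2[1]-1][1])**2)
--                 if distanza_al_quadrato > costo_max_girone:
--                     costo_max_girone = distanza_al_quadrato
--         costo_tot = costo_tot + costo_max_girone
--     return costo_tot
-- ===== SOURCE B (Python) =====
-- def _cross(l, r):
--     # max squared distance over pairs with one endpoint in l and one in r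
--     best = 0
--     for p in l:
--         for q in r:
--             best = max(best, (p[0] - q[0]) ** 2 + (p[1] - q[1]) ** 2)
--     return best
--
--
-- def _diam(pts):
--     # divide and conquer: split in half, recurse, combine with the cross pass
--     if len(pts) <= 1:
--         return 0
--     m = len(pts) // 2
--     l, r = pts[:m], pts[m:]
--     return max(max(_diam(l), _diam(r)), _cross(l, r))
--
--
-- def CalcolaCosto_minmax(dict_gironi, lista_coord):
--     tot = 0
--     for squadre in dict_gironi.values():
--         pts = [lista_coord[s[1] - 1] for s in squadre]
--         tot += _diam(pts)
--     return tot
-- ===== Notes on version B (the rewrite author's own statement) =====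
-- stated objective: alternative
-- what changed: B computes each cluster's max squared pairwise distance by divide-and-conquer (resolve coordinates once, split the point list in half, recurse on each half and combine with a left-vs-right cross pass) instead of A's fused nested all-pairs loops with four list indexings per pair.
import Mathlib
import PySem

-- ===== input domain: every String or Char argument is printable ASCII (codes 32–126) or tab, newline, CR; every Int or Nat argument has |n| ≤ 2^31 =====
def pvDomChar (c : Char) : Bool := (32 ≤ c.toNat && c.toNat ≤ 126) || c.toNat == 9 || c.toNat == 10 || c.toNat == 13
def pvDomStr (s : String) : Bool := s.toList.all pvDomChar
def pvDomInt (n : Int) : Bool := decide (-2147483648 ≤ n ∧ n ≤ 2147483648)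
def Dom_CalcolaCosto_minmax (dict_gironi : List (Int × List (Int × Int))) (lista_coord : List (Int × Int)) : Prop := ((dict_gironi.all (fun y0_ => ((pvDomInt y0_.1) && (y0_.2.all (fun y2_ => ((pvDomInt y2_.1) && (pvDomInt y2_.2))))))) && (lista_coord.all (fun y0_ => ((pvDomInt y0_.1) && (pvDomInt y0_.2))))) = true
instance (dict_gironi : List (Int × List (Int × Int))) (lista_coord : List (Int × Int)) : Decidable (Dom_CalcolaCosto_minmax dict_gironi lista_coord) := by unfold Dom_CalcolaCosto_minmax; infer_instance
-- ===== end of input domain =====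

-- B computes each cluster's max squared distance by divide-and-conquer (split, recurse, cross pass
-- over resolved coordinates) instead of A's nested all-pairs loops with repeated list indexing: alternative algorithm.


-- ===== PORT A =====
def CalcolaCosto_minmax (dict_gironi : List (Int × List (Int × Int))) (lista_coord : List (Int × Int)) : Int :=
  let d := PySem.Dict.ofList dict_gironi
  d.keys.foldl (fun costo_tot girone =>
    let squadre_girone := d.getD girone []
    let costo_max_girone := squadre_girone.foldl (fun cmax squadra1 =>
      squadre_girone.foldl (fun cmax squadra2 =>
        let p1 := PySem.List.pyGetD lista_coord (squadra1.2 - 1) (0, 0)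
        let p2 := PySem.List.pyGetD lista_coord (squadra2.2 - 1) (0, 0)
        let distanza_al_quadrato := (p1.1 - p2.1) ^ 2 + (p1.2 - p2.2) ^ 2
        if distanza_al_quadrato > cmax then distanza_al_quadrato else cmax) cmax) 0
    costo_tot + costo_max_girone) 0

-- ===== PORT B =====
def pvCross (l r : List (Int × Int)) : Int :=
  l.foldl (fun best p => r.foldl (fun best q =>
    max best ((p.1 - q.1) ^ 2 + (p.2 - q.2) ^ 2)) best) 0

def pvDiamGo (fuel : Nat) (pts : List (Int × Int)) : Int :=
  match fuel with
  | 0 => 0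
  | fuel + 1 =>
    if pts.length ≤ 1 then 0
    else
      let m := pts.length / 2
      max (max (pvDiamGo fuel (pts.take m)) (pvDiamGo fuel (pts.drop m)))
          (pvCross (pts.take m) (pts.drop m))

-- fuel = pts.length suffices: each recursive call strictly shortens the list
def pvDiam (pts : List (Int × Int)) : Int := pvDiamGo pts.length pts

def CalcolaCosto_minmax_alt (dict_gironi : List (Int × List (Int × Int))) (lista_coord : List (Int × Int)) : Int :=
  (PySem.Dict.ofList dict_gironi).values.foldl (fun tot squadre =>
    let pts := squadre.map (fun s => PySem.List.pyGetD lista_coord (s.2 - 1) (0, 0))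
    tot + pvDiam pts) 0

-- ===== PRECONDITION & SPEC =====
-- A (and B) raise IndexError exactly when some team index s[1]-1 of an effective cluster is out of
-- Python range for lista_coord; Pre_ excludes exactly those inputs.
def Pre_CalcolaCosto_minmax (dict_gironi : List (Int × List (Int × Int))) (lista_coord : List (Int × Int)) : Prop :=
  ∀ kv ∈ (PySem.Dict.ofList dict_gironi).items, ∀ s ∈ kv.2,
    PySem.Raise.InRange lista_coord.length (s.2 - 1)
instance (dict_gironi : List (Int × List (Int × Int))) (lista_coord : List (Int × Int)) : Decidable (Pre_CalcolaCosto_minmax dict_gironi lista_coord) := by unfold Pre_CalcolaCosto_minmax; infer_instance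
def pvWitness_CalcolaCosto_minmax : (List (Int × List (Int × Int))) × (List (Int × Int)) :=
  ([(1, [(10, 1), (20, 2)]), (2, [(30, 3)])], [(0, 0), (3, 4), (-5, 7)])

def Spec_CalcolaCosto_minmax (dict_gironi : List (Int × List (Int × Int))) (lista_coord : List (Int × Int)) (out : Int) : Prop := out = CalcolaCosto_minmax_alt dict_gironi lista_coord
instance (dict_gironi : List (Int × List (Int × Int))) (lista_coord : List (Int × Int)) (out : Int) : Decidable (Spec_CalcolaCosto_minmax dict_gironi lista_coord out) := by unfold Spec_CalcolaCosto_minmax; infer_instance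

-- ===== CLAIM (what is proved, stated in full; the proofs are below) =====
def Claim_equal_CalcolaCosto_minmax : Prop := ∀ (dict_gironi : List (Int × List (Int × Int))) (lista_coord : List (Int × Int)), Dom_CalcolaCosto_minmax dict_gironi lista_coord → Pre_CalcolaCosto_minmax dict_gironi lista_coord → Spec_CalcolaCosto_minmax dict_gironi lista_coord (CalcolaCosto_minmax dict_gironi lista_coord)

-- ===== LEMMAS AND PROOFS =====

def pvSq (p q : Int × Int) : Int := (p.1 - q.1) ^ 2 + (p.2 - q.2) ^ 2

-- canonical value: max of 0 and all pairwise squared distances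
def pvM (pts : List (Int × Int)) : Int :=
  (pts.flatMap (fun p => pts.map (fun q => pvSq p q))).foldl max 0

theorem pvSq_comm (p q : Int × Int) : pvSq p q = pvSq q p := by unfold pvSq; ring

theorem pvSq_self (p : Int × Int) : pvSq p p = 0 := by simp [pvSq]

theorem pv_ite_max (c x : Int) : (if x > c then x else c) = max c x := by
  rw [max_def]; split_ifs <;> omega

theorem pv_foldl_max_mem (l : List Int) (c : Int) :
    l.foldl max c = c ∨ l.foldl max c ∈ l := by
  induction l generalizing c with
  | nil => exact Or.inl rfl
  | cons x r ih =>
      rcases ih (max c x) with h | h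
      · rw [List.foldl_cons, h]
        rcases max_choice c x with h' | h'
        · exact Or.inl h'
        · exact Or.inr (by simp [h'])
      · exact Or.inr (by simp [List.foldl_cons, h])

theorem pv_foldl_flat {α : Type} (l : List α) (f : α → List Int) (c : Int) :
    l.foldl (fun c a => (f a).foldl max c) c = (l.flatMap f).foldl max c := by
  induction l generalizing c with
  | nil => rfl
  | cons x r ih => rw [List.foldl_cons, ih, List.flatMap_cons, List.foldl_append]

-- properties of pvM
theorem pvM_nonneg (pts : List (Int × Int)) : 0 ≤ pvM pts :=
  (PySem.List.le_foldl_max _ 0).1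

theorem pvM_ub (pts : List (Int × Int)) {p q : Int × Int} (hp : p ∈ pts) (hq : q ∈ pts) :
    pvSq p q ≤ pvM pts :=
  (PySem.List.le_foldl_max _ 0).2 _ (List.mem_flatMap.2 ⟨p, hp, List.mem_map.2 ⟨q, hq, rfl⟩⟩)

theorem pvM_mem (pts : List (Int × Int)) :
    pvM pts = 0 ∨ ∃ p ∈ pts, ∃ q ∈ pts, pvM pts = pvSq p q := by
  rcases pv_foldl_max_mem (pts.flatMap (fun p => pts.map (fun q => pvSq p q))) 0 with h | h
  · exact Or.inl h
  · obtain ⟨p, hp, hx⟩ := List.mem_flatMap.1 h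
    obtain ⟨q, hq, hx⟩ := List.mem_map.1 hx
    exact Or.inr ⟨p, hp, q, hq, hx.symm⟩

-- properties of pvCross
theorem pvCross_eq_flat (l r : List (Int × Int)) :
    pvCross l r = (l.flatMap (fun p => r.map (fun q => pvSq p q))).foldl max 0 := by
  unfold pvCross
  rw [← pv_foldl_flat]
  simp only [List.foldl_map, pvSq]

theorem pvCross_ub (l r : List (Int × Int)) {p q : Int × Int} (hp : p ∈ l) (hq : q ∈ r) :
    pvSq p q ≤ pvCross l r := by
  rw [pvCross_eq_flat]
  exact (PySem.List.le_foldl_max _ 0).2 _ (List.mem_flatMap.2 ⟨p, hp, List.mem_map.2 ⟨q, hq, rfl⟩⟩)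

theorem pvCross_mem (l r : List (Int × Int)) :
    pvCross l r = 0 ∨ ∃ p ∈ l, ∃ q ∈ r, pvCross l r = pvSq p q := by
  rw [pvCross_eq_flat]
  rcases pv_foldl_max_mem (l.flatMap (fun p => r.map (fun q => pvSq p q))) 0 with h | h
  · exact Or.inl h
  · obtain ⟨p, hp, hx⟩ := List.mem_flatMap.1 h
    obtain ⟨q, hq, hx⟩ := List.mem_map.1 hx
    exact Or.inr ⟨p, hp, q, hq, hx.symm⟩

-- properties of pvDiam, by induction on the fuel of its divide-and-conquer recursion
theorem pvDiamGo_nonneg (fuel : Nat) (pts : List (Int × Int)) : 0 ≤ pvDiamGo fuel pts := by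
  induction fuel generalizing pts with
  | zero => simp [pvDiamGo]
  | succ fuel ih =>
      unfold pvDiamGo
      split
      · exact le_refl 0
      · exact le_trans (ih _) (le_trans (le_max_left _ _) (le_max_left _ _))

theorem pvDiamGo_ub (fuel : Nat) (pts : List (Int × Int)) (hf : pts.length ≤ fuel)
    {p q : Int × Int} (hp : p ∈ pts) (hq : q ∈ pts) : pvSq p q ≤ pvDiamGo fuel pts := by
  induction fuel generalizing pts with
  | zero =>
      rw [Nat.le_zero, List.length_eq_zero_iff] at hf
      simp [hf] at hp
  | succ fuel ih =>
      unfold pvDiamGo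
      split
      · rename_i h1
        interval_cases hlen : pts.length
        · simp [List.length_eq_zero_iff.1 hlen] at hp
        · obtain ⟨a, rfl⟩ := List.length_eq_one_iff.1 hlen
          simp at hp hq; subst hp; subst hq; simp [pvSq_self]
      · rename_i h1
        have hm1 : 1 ≤ pts.length / 2 := by omega
        have htake : (pts.take (pts.length / 2)).length ≤ fuel := by
          simp only [List.length_take]; omega
        have hdrop : (pts.drop (pts.length / 2)).length ≤ fuel := by
          simp only [List.length_drop]; omega
        have hsplit : pts = pts.take (pts.length / 2) ++ pts.drop (pts.length / 2) :=
          (List.take_append_drop _ pts).symm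
        rw [hsplit, List.mem_append] at hp hq
        rcases hp with hp | hp <;> rcases hq with hq | hq
        · exact le_trans (ih _ htake hp hq) (le_trans (le_max_left _ _) (le_max_left _ _))
        · exact le_trans (pvCross_ub _ _ hp hq) (le_max_right _ _)
        · rw [pvSq_comm]
          exact le_trans (pvCross_ub _ _ hq hp) (le_max_right _ _)
        · exact le_trans (ih _ hdrop hp hq) (le_trans (le_max_right _ _) (le_max_left _ _))

theorem pvDiamGo_mem (fuel : Nat) (pts : List (Int × Int)) :
    pvDiamGo fuel pts = 0 ∨ ∃ p ∈ pts, ∃ q ∈ pts, pvDiamGo fuel pts = pvSq p q := by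
  induction fuel generalizing pts with
  | zero => exact Or.inl rfl
  | succ fuel ih =>
      unfold pvDiamGo
      split
      · exact Or.inl rfl
      · have hmem : ∀ x ∈ pts.take (pts.length / 2), x ∈ pts := fun x hx => List.take_subset _ pts hx
        have hmem' : ∀ x ∈ pts.drop (pts.length / 2), x ∈ pts := fun x hx => List.drop_subset _ pts hx
        rcases max_choice (max (pvDiamGo fuel (pts.take (pts.length / 2))) (pvDiamGo fuel (pts.drop (pts.length / 2))))
            (pvCross (pts.take (pts.length / 2)) (pts.drop (pts.length / 2))) with h2 | h2 <;> rw [h2]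
        · rcases max_choice (pvDiamGo fuel (pts.take (pts.length / 2))) (pvDiamGo fuel (pts.drop (pts.length / 2))) with h3 | h3 <;> rw [h3]
          · rcases ih (pts.take (pts.length / 2)) with h4 | ⟨p, hp, q, hq, h4⟩
            · exact Or.inl h4
            · exact Or.inr ⟨p, hmem p hp, q, hmem q hq, h4⟩
          · rcases ih (pts.drop (pts.length / 2)) with h4 | ⟨p, hp, q, hq, h4⟩
            · exact Or.inl h4
            · exact Or.inr ⟨p, hmem' p hp, q, hmem' q hq, h4⟩
        · rcases pvCross_mem (pts.take (pts.length / 2)) (pts.drop (pts.length / 2)) with h4 | ⟨p, hp, q, hq, h4⟩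
          · exact Or.inl h4
          · exact Or.inr ⟨p, hmem p hp, q, hmem' q hq, h4⟩

-- uniqueness: any two values with the three characterising properties agree
theorem pv_unique (pts : List (Int × Int)) (v w : Int)
    (hv0 : 0 ≤ v) (hvu : ∀ p ∈ pts, ∀ q ∈ pts, pvSq p q ≤ v)
    (hvm : v = 0 ∨ ∃ p ∈ pts, ∃ q ∈ pts, v = pvSq p q)
    (hw0 : 0 ≤ w) (hwu : ∀ p ∈ pts, ∀ q ∈ pts, pvSq p q ≤ w)
    (hwm : w = 0 ∨ ∃ p ∈ pts, ∃ q ∈ pts, w = pvSq p q) : v = w := by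
  apply le_antisymm
  · rcases hvm with h | ⟨p, hp, q, hq, h⟩
    · omega
    · rw [h]; exact hwu p hp q hq
  · rcases hwm with h | ⟨p, hp, q, hq, h⟩
    · omega
    · rw [h]; exact hvu p hp q hq

theorem pvDiam_eq_pvM (pts : List (Int × Int)) : pvDiam pts = pvM pts :=
  pv_unique pts _ _ (pvDiamGo_nonneg _ pts) (fun _ hp _ hq => pvDiamGo_ub _ pts le_rfl hp hq)
    (pvDiamGo_mem _ pts) (pvM_nonneg pts) (fun _ hp _ hq => pvM_ub pts hp hq) (pvM_mem pts)

theorem pv_girone (lc : List (Int × Int)) (squadre : List (Int × Int)) :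
    squadre.foldl (fun cmax s1 => squadre.foldl (fun cmax s2 =>
        max cmax (pvSq (PySem.List.pyGetD lc (s1.2 - 1) (0, 0))
                       (PySem.List.pyGetD lc (s2.2 - 1) (0, 0)))) cmax) 0
    = pvDiam (squadre.map (fun s => PySem.List.pyGetD lc (s.2 - 1) (0, 0))) := by
  rw [pvDiam_eq_pvM]
  have hL : squadre.foldl (fun cmax s1 => squadre.foldl (fun cmax s2 =>
        max cmax (pvSq (PySem.List.pyGetD lc (s1.2 - 1) (0, 0))
                       (PySem.List.pyGetD lc (s2.2 - 1) (0, 0)))) cmax) 0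
      = (squadre.map (fun s => PySem.List.pyGetD lc (s.2 - 1) (0, 0))).foldl
          (fun c p => (squadre.map (fun s => PySem.List.pyGetD lc (s.2 - 1) (0, 0))).foldl
            (fun c q => max c (pvSq p q)) c) 0 := by
    simp only [List.foldl_map]
  rw [hL]
  unfold pvM
  rw [← pv_foldl_flat]
  simp only [List.foldl_map]

theorem pvSq_def (p q : Int × Int) : (p.1 - q.1) ^ 2 + (p.2 - q.2) ^ 2 = pvSq p q := rfl

-- ===== VERDICT (by name: the statement is the Claim_ definition above) =====
theorem CalcolaCosto_minmax_spec : Claim_equal_CalcolaCosto_minmax := by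
  intro dg lc _ _
  unfold Spec_CalcolaCosto_minmax CalcolaCosto_minmax CalcolaCosto_minmax_alt
  rw [PySem.Dict.values_eq_map_keys _ (PySem.Dict.nodup_keys_ofList _) ([] : List (Int × Int)),
    List.foldl_map]
  simp only [pv_ite_max, pvSq_def]
  congr 1
  funext costo_tot girone
  congr 1
  exact pv_girone lc _
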